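-- pv_equiv track=rewrite | github.com/SceptreData/janice | app/main.py | _infer_node_type
-- ===== SOURCE A (Python) =====
-- _TYPE_KEYWORDS = {
--     "source": {"source", "summary", "document", "report", "transcript", "meeting"},
--     "entity": {"entity", "person", "organization", "place", "company", "team", "vendor"},
--     "concept": {"concept", "idea", "theory", "framework", "principle"},
--     "topic": {"project", "program", "initiative", "legal", "policy", "process", "procurement", "negotiation"},
--     "meta": {"meta", "index", "log"},
-- }
--
-- def _infer_node_type(name: str, fm: dict) -> str:
--     """Derive a graph node type from page name and frontmatter tags."""
--     if name in ("index", "log"):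
--         return "meta"
--     tags = {t.lower() for t in fm.get("tags", [])}
--     for node_type, keywords in _TYPE_KEYWORDS.items():
--         if tags & keywords:
--             return node_type
--     if fm.get("sources"):
--         return "source"
--     return "topic"
-- ===== SOURCE B (Python) =====
-- _TYPE_KEYWORDS = {
--     "source": {"source", "summary", "document", "report", "transcript", "meeting"},
--     "entity": {"entity", "person", "organization", "place", "company", "team", "vendor"},
--     "concept": {"concept", "idea", "theory", "framework", "principle"},
--     "topic": {"project", "program", "initiative", "legal", "policy", "process", "procurement", "negotiation"},
--     "meta": {"meta", "index", "log"},
-- }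
--
-- _ORDERED = list(_TYPE_KEYWORDS.items())
--
--
-- def _infer_node_type(name: str, fm: dict) -> str:
--     """Derive a graph node type from page name and frontmatter tags."""
--     if name in ("index", "log"):
--         return "meta"
--     best = len(_ORDERED)
--     for t in fm.get("tags", []):
--         tl = t.lower()
--         for i, (_, kws) in enumerate(_ORDERED):
--             if tl in kws:
--                 if i < best:
--                     best = i
--                 break
--     if best < len(_ORDERED):
--         return _ORDERED[best][0]
--     if fm.get("sources"):
--         return "source"
--     return "topic"
-- ===== Notes on version B (the rewrite author's own statement) =====
-- stated objective: alternative
-- what changed: A iterates over the five categories testing set intersection against a dedup set of lowered tags; B makes a single pass over the tags, computing each tag's first-matching category rank and keeping the minimum rank, then returns that category or the sources/topic fallback.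
import Mathlib
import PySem

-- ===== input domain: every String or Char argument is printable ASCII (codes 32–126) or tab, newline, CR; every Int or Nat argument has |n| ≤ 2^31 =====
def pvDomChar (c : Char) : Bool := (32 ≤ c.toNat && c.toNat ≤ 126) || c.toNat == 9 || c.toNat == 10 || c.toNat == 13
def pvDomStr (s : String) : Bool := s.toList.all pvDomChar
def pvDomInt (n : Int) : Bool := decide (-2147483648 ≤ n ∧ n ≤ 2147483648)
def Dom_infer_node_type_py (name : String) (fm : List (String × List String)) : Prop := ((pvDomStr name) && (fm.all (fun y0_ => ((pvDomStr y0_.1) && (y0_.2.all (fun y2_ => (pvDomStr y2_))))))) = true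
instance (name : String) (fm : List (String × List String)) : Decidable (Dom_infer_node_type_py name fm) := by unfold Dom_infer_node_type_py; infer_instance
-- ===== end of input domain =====

-- B changes the traversal: a single pass over the tags tracking the minimal category rank,
-- instead of A's pass over the five categories testing set intersection (objective: alternative).

-- ===== PORT A =====
def kwSource : List String := ["source", "summary", "document", "report", "transcript", "meeting"]
def kwEntity : List String := ["entity", "person", "organization", "place", "company", "team", "vendor"]
def kwConcept : List String := ["concept", "idea", "theory", "framework", "principle"]
def kwTopic : List String := ["project", "program", "initiative", "legal", "policy", "process", "procurement", "negotiation"]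
def kwMeta : List String := ["meta", "index", "log"]

def infer_node_type_py (name : String) (fm : List (String × List String)) : String :=
  if name == "index" || name == "log" then "meta"
  else
    let tags : PySem.Set String :=
      PySem.Set.ofList (((PySem.Dict.mk fm).getD "tags" []).map PySem.Str.lower)
    if !(PySem.Set.inter tags kwSource).isEmpty then "source"
    else if !(PySem.Set.inter tags kwEntity).isEmpty then "entity"
    else if !(PySem.Set.inter tags kwConcept).isEmpty then "concept"
    else if !(PySem.Set.inter tags kwTopic).isEmpty then "topic"
    else if !(PySem.Set.inter tags kwMeta).isEmpty then "meta"
    else if !((PySem.Dict.mk fm).getD "sources" []).isEmpty then "source"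
    else "topic"

-- ===== PORT B =====
def catList : List (String × List String) :=
  [("source", kwSource), ("entity", kwEntity), ("concept", kwConcept),
   ("topic", kwTopic), ("meta", kwMeta)]

-- inner loop of B: first category (by index) whose keyword set contains the tag
def firstRank : List (String × List String) → Nat → String → Option Nat
  | [], _, _ => none
  | (_, kws) :: rest, i, t => if kws.contains t then some i else firstRank rest (i + 1) t

def infer_node_type_py_alt (name : String) (fm : List (String × List String)) : String :=
  if name == "index" || name == "log" then "meta"
  else
    let best :=
      ((PySem.Dict.mk fm).getD "tags" []).foldl
        (fun b t =>
          match firstRank catList 0 (PySem.Str.lower t) with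
          | some i => if i < b then i else b
          | none => b) catList.length
    if best < catList.length then (catList.getD best ("", [])).1
    else if !((PySem.Dict.mk fm).getD "sources" []).isEmpty then "source"
    else "topic"

-- ===== PRECONDITION & SPEC =====
def Spec_infer_node_type_py (name : String) (fm : List (String × List String)) (out : String) : Prop := out = infer_node_type_py_alt name fm
instance (name : String) (fm : List (String × List String)) (out : String) : Decidable (Spec_infer_node_type_py name fm out) := by unfold Spec_infer_node_type_py; infer_instance

-- ===== CLAIM (what is proved, stated in full; the proofs are below) =====
def Claim_equal_infer_node_type_py : Prop := ∀ (name : String) (fm : List (String × List String)), Dom_infer_node_type_py name fm → Spec_infer_node_type_py name fm (infer_node_type_py name fm)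

-- ===== LEMMAS AND PROOFS =====

-- rank of a single (already lowered) tag: index of the first category containing it, 5 if none
def pvRank (t : String) : Nat :=
  if kwSource.contains t then 0
  else if kwEntity.contains t then 1
  else if kwConcept.contains t then 2
  else if kwTopic.contains t then 3
  else if kwMeta.contains t then 4
  else 5

-- minimal rank present in a list of (lowered) tags, phrased as A's cascade of any-tests
def pvMinRank (ts : List String) : Nat :=
  if ts.any (fun t => kwSource.contains t) then 0
  else if ts.any (fun t => kwEntity.contains t) then 1
  else if ts.any (fun t => kwConcept.contains t) then 2
  else if ts.any (fun t => kwTopic.contains t) then 3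
  else if ts.any (fun t => kwMeta.contains t) then 4
  else 5

lemma firstRank_eq (t : String) :
    firstRank catList 0 t =
      (if kwSource.contains t then some 0
       else if kwEntity.contains t then some 1
       else if kwConcept.contains t then some 2
       else if kwTopic.contains t then some 3
       else if kwMeta.contains t then some 4
       else none) := by
  simp [catList, firstRank]

lemma ite_lt_eq_min (i b : Nat) : (if i < b then i else b) = min i b := by
  rcases Nat.lt_or_ge i b with h | h
  · rw [if_pos h, Nat.min_def, if_pos (Nat.le_of_lt h)]
  · rw [if_neg (Nat.not_lt.2 h), Nat.min_def]
    split_ifs <;> omega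

lemma step_eq (b : Nat) (t : String) (hb : b ≤ 5) :
    (match firstRank catList 0 t with
     | some i => if i < b then i else b
     | none => b) = min (pvRank t) b := by
  rw [firstRank_eq]
  unfold pvRank
  split_ifs
  · exact ite_lt_eq_min 0 b
  · exact ite_lt_eq_min 1 b
  · exact ite_lt_eq_min 2 b
  · exact ite_lt_eq_min 3 b
  · exact ite_lt_eq_min 4 b
  · show b = min 5 b
    omega

lemma pvMinRank_le (ts : List String) : pvMinRank ts ≤ 5 := by
  unfold pvMinRank; split_ifs <;> omega

-- the Boolean core of pvMinRank_cons, closed by exhaustive evaluation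
lemma cascade_min (c0 c1 c2 c3 c4 a0 a1 a2 a3 a4 : Bool) :
    (if (c0 || a0) = true then 0
     else if (c1 || a1) = true then 1
     else if (c2 || a2) = true then 2
     else if (c3 || a3) = true then 3
     else if (c4 || a4) = true then 4
     else 5 : Nat)
    = min (if c0 = true then 0 else if c1 = true then 1 else if c2 = true then 2
           else if c3 = true then 3 else if c4 = true then 4 else 5)
          (if a0 = true then 0 else if a1 = true then 1 else if a2 = true then 2
           else if a3 = true then 3 else if a4 = true then 4 else 5) := by
  revert c0 c1 c2 c3 c4 a0 a1 a2 a3 a4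
  decide

lemma pvMinRank_cons (t : String) (ts : List String) :
    pvMinRank (t :: ts) = min (pvRank t) (pvMinRank ts) := by
  unfold pvMinRank pvRank
  simp only [List.any_cons]
  exact cascade_min _ _ _ _ _ _ _ _ _ _

lemma fold_eq (l : List String) (b : Nat) (hb : b ≤ 5) :
    l.foldl (fun b t =>
      match firstRank catList 0 (PySem.Str.lower t) with
      | some i => if i < b then i else b
      | none => b) b = min (pvMinRank (l.map PySem.Str.lower)) b := by
  induction l generalizing b with
  | nil =>
      simp [pvMinRank]
      omega
  | cons t ts ih =>
      simp only [List.foldl_cons]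
      rw [step_eq b (PySem.Str.lower t) hb]
      rw [ih (min (pvRank (PySem.Str.lower t)) b) (by omega)]
      rw [List.map_cons, pvMinRank_cons]
      omega

lemma inter_bool (kw ts : List String) :
    (!(PySem.Set.inter (PySem.Set.ofList ts) kw).isEmpty) = ts.any (fun t => kw.contains t) := by
  rw [Bool.eq_iff_iff]
  simp [PySem.Set.inter, PySem.Set.mem_ofList, List.any_eq_true]

-- ===== VERDICT (by name: the statement is the Claim_ definition above) =====
theorem infer_node_type_py_spec : Claim_equal_infer_node_type_py := by
  intro name fm _
  unfold Spec_infer_node_type_py infer_node_type_py infer_node_type_py_alt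
  by_cases hn : (name == "index" || name == "log") = true
  · simp [hn]
  · simp only [hn, if_false, Bool.false_eq_true]
    have hlen : catList.length = 5 := rfl
    rw [hlen, fold_eq _ 5 (by omega)]
    have h5 : min (pvMinRank (((PySem.Dict.mk fm).getD "tags" []).map PySem.Str.lower)) 5
        = pvMinRank (((PySem.Dict.mk fm).getD "tags" []).map PySem.Str.lower) := by
      have := pvMinRank_le (((PySem.Dict.mk fm).getD "tags" []).map PySem.Str.lower)
      omega
    rw [h5]
    simp only [inter_bool]
    unfold pvMinRank
    split_ifs <;>
      first
        | omega
        | simp [catList, kwSource, kwEntity, kwConcept, kwTopic, kwMeta, List.getD]
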